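-- pv_equiv track=rewrite | github.com/skyfireitdiy/Jarvis | src/jarvis/jarvis_code_agent/lint.py | group_commands_by_template
-- ===== SOURCE A (Python) =====
-- from typing import Dict, List, Tuple, Optional
--
-- def group_commands_by_template(
--     commands: List[Tuple[str, str]],
-- ) -> Dict[str, List[Tuple[str, str]]]:
--     """
--     按命令模板分组命令（通过命令的第一个单词识别）
--
--     Args:
--         commands: [(file_path, command), ...] 格式的命令列表
--
--     Returns:
--         {template_key: [(file_path, command), ...]} 格式的字典
--         template_key 是命令的第一个单词
--     """
--     grouped = {}
--     for file_path, command in commands: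
--         # 使用命令的第一个单词作为分组键
--         template_key = command.split()[0] if command.split() else "unknown"
--         if template_key not in grouped:
--             grouped[template_key] = []
--         grouped[template_key].append((file_path, command))
--     return grouped
-- ===== SOURCE B (Python) =====
-- from typing import Dict, List, Tuple
--
-- def group_commands_by_template(
--     commands: List[Tuple[str, str]],
-- ) -> Dict[str, List[Tuple[str, str]]]:
--     def key(command: str) -> str:
--         parts = command.split()
--         return parts[0] if parts else "unknown"
--
--     keys = list(dict.fromkeys(key(c) for _, c in commands))
--     return {k: [(f, c) for f, c in commands if key(c) == k] for k in keys}
-- ===== Notes on version B (the rewrite author's own statement) =====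
-- stated objective: alternative
-- what changed: Replaces the incremental dict-insert-and-append single pass with a two-phase strategy: first collect the distinct group keys in first-occurrence order via dict.fromkeys, then build the result as a dict comprehension that filters the command list once per key.
import Mathlib
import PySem

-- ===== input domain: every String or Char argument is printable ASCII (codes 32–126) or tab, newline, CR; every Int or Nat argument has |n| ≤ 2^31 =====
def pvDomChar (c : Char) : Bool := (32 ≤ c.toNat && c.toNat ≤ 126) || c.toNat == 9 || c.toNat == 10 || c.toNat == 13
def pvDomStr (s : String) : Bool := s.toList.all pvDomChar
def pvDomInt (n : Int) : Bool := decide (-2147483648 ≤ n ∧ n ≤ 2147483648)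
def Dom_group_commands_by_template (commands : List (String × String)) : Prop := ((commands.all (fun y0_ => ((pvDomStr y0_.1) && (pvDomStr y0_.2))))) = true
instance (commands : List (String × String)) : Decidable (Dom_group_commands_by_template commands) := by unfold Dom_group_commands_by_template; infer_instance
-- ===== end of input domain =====

-- B groups by a different strategy: collect distinct keys in first-occurrence order, then filter per key
-- (alternative decomposition, same result; no speed claim).

-- ===== PORT A =====
-- shared helper: command.split()[0] if command.split() else "unknown"
def pvKeyOf (command : String) : String :=
  match PySem.Str.split₀ command with
  | [] => "unknown"
  | k :: _ => k

def group_commands_by_template (commands : List (String × String)) : List (String × List (String × String)) :=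
  (commands.foldl
    (fun grouped p =>
      let k := pvKeyOf p.2
      let grouped := if grouped.contains k then grouped else grouped.insert k []
      grouped.modify k [] (fun l => l ++ [p]))
    PySem.Dict.empty).items

-- ===== PORT B =====
def group_commands_by_template_alt (commands : List (String × String)) : List (String × List (String × String)) :=
  let keys := PySem.List.dedup (commands.map (fun p => pvKeyOf p.2))
  keys.map (fun k => (k, commands.filter (fun p => pvKeyOf p.2 == k)))

-- ===== PRECONDITION & SPEC =====
def Spec_group_commands_by_template (commands : List (String × String)) (out : List (String × List (String × String))) : Prop := out = group_commands_by_template_alt commands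
instance (commands : List (String × String)) (out : List (String × List (String × String))) : Decidable (Spec_group_commands_by_template commands out) := by unfold Spec_group_commands_by_template; infer_instance

-- ===== CLAIM (what is proved, stated in full; the proofs are below) =====
def Claim_equal_group_commands_by_template : Prop := ∀ (commands : List (String × String)), Dom_group_commands_by_template commands → Spec_group_commands_by_template commands (group_commands_by_template commands)

-- ===== LEMMAS AND PROOFS =====

-- A's guarded insert-then-modify step equals a bare modify step
theorem pv_step_eq_modify (g : PySem.Dict String (List (String × String)))
    (p : String × String) :
    (let k := pvKeyOf p.2
     let g' := if g.contains k then g else g.insert k []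
     g'.modify k [] (fun l => l ++ [p])) =
    g.modify (pvKeyOf p.2) [] (fun l => l ++ [p]) := by
  by_cases h : g.contains (pvKeyOf p.2)
  · simp [h]
  · simp only [Bool.not_eq_true] at h
    simp only [h, if_neg Bool.false_ne_true, PySem.Dict.modify,
      PySem.Dict.getD_insert_self, PySem.Dict.insert_insert_self,
      PySem.Dict.getD_of_not_contains g [] h]

-- A's dict loop is the canonical grouping-by-modify loop
theorem pv_loop_eq (commands : List (String × String)) :
    (commands.foldl
      (fun grouped p =>
        let k := pvKeyOf p.2
        let grouped := if grouped.contains k then grouped else grouped.insert k []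
        grouped.modify k [] (fun l => l ++ [p]))
      PySem.Dict.empty) =
    (commands.map (fun p => (pvKeyOf p.2, p))).foldl
      (fun d q => d.modify q.1 [] (fun l => l ++ [q.2])) PySem.Dict.empty := by
  rw [List.foldl_map]
  exact PySem.List.foldl_congr_mem _ _ _ _ (fun g p _ => pv_step_eq_modify g p)

theorem pv_getD_loop (commands : List (String × String)) (c : String) :
    ((commands.map (fun p => (pvKeyOf p.2, p))).foldl
      (fun d q => d.modify q.1 [] (fun l => l ++ [q.2])) PySem.Dict.empty).getD c [] =
    commands.filter (fun p => pvKeyOf p.2 == c) := by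
  rw [PySem.Dict.getD_foldl_modify_append]
  simp [List.filter_map, Function.comp_def]

theorem pv_keys_loop (commands : List (String × String)) :
    ((commands.map (fun p => (pvKeyOf p.2, p))).foldl
      (fun d q => d.modify q.1 [] (fun l => l ++ [q.2])) PySem.Dict.empty).keys =
    PySem.List.dedup (commands.map (fun p => pvKeyOf p.2)) := by
  rw [List.foldl_map, PySem.Dict.keys_foldl_modify_key
    commands (fun p => pvKeyOf p.2) [] (fun _ p l => l ++ [p]) PySem.Dict.empty]
  simp [PySem.Dict.keys_empty, PySem.Set.update, PySem.Set.ofList,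
    PySem.List.dedup_eq_ofList, PySem.Set.empty]

-- ===== VERDICT (by name: the statement is the Claim_ definition above) =====
theorem group_commands_by_template_spec : Claim_equal_group_commands_by_template := by
  intro commands _
  unfold Spec_group_commands_by_template group_commands_by_template group_commands_by_template_alt
  rw [pv_loop_eq]
  have hnd : ((commands.map (fun p => (pvKeyOf p.2, p))).foldl
      (fun d q => d.modify q.1 [] (fun l => l ++ [q.2])) PySem.Dict.empty).keys.Nodup := by
    rw [List.foldl_map]
    exact PySem.Dict.nodup_keys_foldl_modify_key commands (fun p => pvKeyOf p.2) []
      (fun _ p l => l ++ [p]) PySem.Dict.empty (by simp [PySem.Dict.keys_empty])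
  rw [PySem.Dict.items_eq_map_keys _ hnd [], pv_keys_loop]
  exact List.map_congr_left (fun k _ => by rw [pv_getD_loop])
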